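-- pv_equiv track=rewrite | github.com/balaji-kss/pose-alignment | pick_baseline.py | custom_clustering_side
-- ===== SOURCE A (Python) =====
-- def custom_clustering_side(data, max_diff):
--     # Sort the data to make comparisons between consecutive elements
--     sorted_data = data
--     sorted_data.sort()
--
--     # Initialize the first cluster
--     clusters = []
--     current_cluster = [sorted_data[0]]
--
--     # Iterate through the sorted data
--     for i in range(1, len(sorted_data)):
--         # Check if the next element should be in the same cluster
--         if abs(sorted_data[i][0] - sorted_data[i - 1][0]) <= max_diff:
--             current_cluster.append(sorted_data[i])
--         else:
--             # If not, add the current cluster to the list of clusters and start a new one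
--             clusters.append(current_cluster)
--             current_cluster = [sorted_data[i]]
--
--     # Add the last cluster to the list if not empty
--     if current_cluster:
--         clusters.append(current_cluster)
--
--     return clusters
-- ===== SOURCE B (Python) =====
-- def custom_clustering_side(data, max_diff):
--     # Staged passes instead of a single accumulator scan: sort in place, compute
--     # the break indices, assemble boundaries, and cut the list into slices.
--     data.sort()
--     n = len(data)
--     breaks = [i for i in range(1, n) if abs(data[i][0] - data[i - 1][0]) > max_diff]
--     bounds = [0] + breaks + [n]
--     return [data[bounds[j]:bounds[j + 1]] for j in range(len(bounds) - 1)]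
-- ===== Notes on version B (the rewrite author's own statement) =====
-- stated objective: alternative
-- what changed: B replaces A's single accumulator scan (grow current_cluster, flush at each break) by staged passes: sort, compute the list of break indices with a comprehension, assemble boundary positions, then cut the sorted list into slices between consecutive boundaries.
import Mathlib
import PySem

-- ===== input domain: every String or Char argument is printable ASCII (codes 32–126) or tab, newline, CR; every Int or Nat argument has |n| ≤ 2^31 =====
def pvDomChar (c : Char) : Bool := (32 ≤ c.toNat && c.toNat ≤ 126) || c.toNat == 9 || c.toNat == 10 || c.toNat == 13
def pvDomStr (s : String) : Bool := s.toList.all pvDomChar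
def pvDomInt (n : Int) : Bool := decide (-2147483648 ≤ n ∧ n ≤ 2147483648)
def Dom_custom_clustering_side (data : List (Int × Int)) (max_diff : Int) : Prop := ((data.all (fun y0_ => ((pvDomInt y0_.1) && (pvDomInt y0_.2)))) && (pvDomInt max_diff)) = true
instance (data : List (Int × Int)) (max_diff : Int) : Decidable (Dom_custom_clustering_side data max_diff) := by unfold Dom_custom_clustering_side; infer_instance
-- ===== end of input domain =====

-- B clusters by staged passes (compute break indices, then cut the sorted list into slices
-- at those boundaries) instead of A's single scan with a current-cluster accumulator; in
-- Python both sort `data` in place; equivalence is about the return value.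


-- ===== PORT A =====
-- A's for-loop: prev = sorted_data[i-1], cur = current_cluster, clusters so far, rest of the data
def aLoop (d : Int) (prev : Int × Int) (cur : List (Int × Int))
    (clusters : List (List (Int × Int))) : List (Int × Int) → List (List (Int × Int))
  | [] => if cur ≠ [] then clusters ++ [cur] else clusters
  | x :: rest =>
      if |x.1 - prev.1| ≤ d then aLoop d x (cur ++ [x]) clusters rest
      else aLoop d x [x] (clusters ++ [cur]) rest

def custom_clustering_side (data : List (Int × Int)) (max_diff : Int) : List (List (Int × Int)) :=
  let sorted_data := PySem.List.sorted2 data Prod.fst Prod.snd   -- data.sort() on int pairs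
  match sorted_data with
  | [] => []   -- Python raises IndexError (sorted_data[0]) here; excluded by Pre_
  | h :: t => aLoop max_diff h [h] [] t

-- ===== PORT B =====
def custom_clustering_side_alt (data : List (Int × Int)) (max_diff : Int) : List (List (Int × Int)) :=
  let d := PySem.List.sorted2 data Prod.fst Prod.snd             -- data.sort()
  let n : Int := d.length
  let breaks := (PySem.List.pyRange 1 n 1).filter (fun i =>
      decide (max_diff < |(PySem.List.pyGetD d i (0, 0)).1 - (PySem.List.pyGetD d (i - 1) (0, 0)).1|))
  let bounds := 0 :: (breaks ++ [n])
  (PySem.List.pyRange 0 ((bounds.length : Int) - 1) 1).map (fun j =>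
      PySem.List.slice d (some (PySem.List.pyGetD bounds j 0)) (some (PySem.List.pyGetD bounds (j + 1) 0)))

-- ===== PRECONDITION & SPEC =====
-- Pre_ excludes only the empty list, on which Python A raises IndexError at sorted_data[0].
def Pre_custom_clustering_side (data : List (Int × Int)) (max_diff : Int) : Prop := data ≠ []
instance (data : List (Int × Int)) (max_diff : Int) : Decidable (Pre_custom_clustering_side data max_diff) := by unfold Pre_custom_clustering_side; infer_instance
def pvWitness_custom_clustering_side : (List (Int × Int)) × Int := ([(0, 0), (3, 1)], 1)

def Spec_custom_clustering_side (data : List (Int × Int)) (max_diff : Int) (out : List (List (Int × Int))) : Prop := out = custom_clustering_side_alt data max_diff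
instance (data : List (Int × Int)) (max_diff : Int) (out : List (List (Int × Int))) : Decidable (Spec_custom_clustering_side data max_diff out) := by unfold Spec_custom_clustering_side; infer_instance

-- ===== CLAIM (what is proved, stated in full; the proofs are below) =====
def Claim_equal_custom_clustering_side : Prop := ∀ (data : List (Int × Int)) (max_diff : Int), Dom_custom_clustering_side data max_diff → Pre_custom_clustering_side data max_diff → Spec_custom_clustering_side data max_diff (custom_clustering_side data max_diff)

-- ===== LEMMAS AND PROOFS =====

-- reference grouping: clusters of prev :: rest, first cluster starts with prev
def grp (d : Int) : (Int × Int) → List (Int × Int) → List (List (Int × Int))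
  | p, [] => [[p]]
  | p, x :: xs =>
      if |x.1 - p.1| ≤ d then
        match grp d x xs with
        | c :: rest => (p :: c) :: rest
        | [] => [[p]]          -- unreachable
      else [p] :: grp d x xs

theorem grp_head (d : Int) (p : Int × Int) (t : List (Int × Int)) :
    ∃ c rest, grp d p t = (p :: c) :: rest := by
  match t with
  | [] => exact ⟨[], [], rfl⟩
  | x :: xs =>
      by_cases h : |x.1 - p.1| ≤ d
      · obtain ⟨c', rest', hx⟩ := grp_head d x xs
        exact ⟨x :: c', rest', by simp [grp, h, hx]⟩
      · exact ⟨[], grp d x xs, by simp [grp, h]⟩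

-- A's loop run from (prev, cur, clusters) produces clusters ++ grp, with cur replacing [prev]
theorem aLoop_eq (d : Int) (t : List (Int × Int)) :
    ∀ (prev : Int × Int) (cur : List (Int × Int)) (clusters : List (List (Int × Int)))
      (c : List (Int × Int)) (rest : List (List (Int × Int))),
      cur ≠ [] → grp d prev t = (prev :: c) :: rest →
      aLoop d prev cur clusters t = clusters ++ (cur ++ c) :: rest := by
  induction t with
  | nil =>
      intro prev cur clusters c rest hcur hG
      have h0 : ([[prev]] : List (List (Int × Int))) = (prev :: c) :: rest := hG
      injection h0 with e1 e2
      injection e1 with e3 e4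
      rw [← e2, ← e4]
      simp [aLoop, hcur]
  | cons x t' ih =>
      intro prev cur clusters c rest hcur hG
      obtain ⟨c', rest', hx⟩ := grp_head d x t'
      by_cases h : |x.1 - prev.1| ≤ d
      · simp only [grp, if_pos h, hx] at hG
        injection hG with e1 e2
        injection e1 with e3 e4
        simp only [aLoop, if_pos h]
        rw [ih x (cur ++ [x]) clusters c' rest' (by simp) hx, ← e4, ← e2]
        simp
      · simp only [grp, if_neg h] at hG
        injection hG with e1 e2
        injection e1 with e3 e4
        simp only [aLoop, if_neg h]
        rw [ih x [x] (clusters ++ [cur]) c' rest' (by simp) hx, ← e4, ← e2]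
        simp [hx]

-- break positions of a list, as Nat indices starting at k (index of the second element shown)
def brkF (d : Int) (k : Nat) : List (Int × Int) → List Nat
  | p :: x :: xs => (if d < |x.1 - p.1| then [k] else []) ++ brkF d (k + 1) (x :: xs)
  | _ => []

theorem brkF_shift (d : Int) (s : List (Int × Int)) :
    ∀ k, brkF d (k + 1) s = (brkF d k s).map (· + 1) := by
  induction s with
  | nil => intro k; rfl
  | cons p s ih =>
      intro k
      match s with
      | [] => rfl
      | x :: xs =>
          simp only [brkF, List.map_append, ← ih]
          by_cases h : d < |x.1 - p.1| <;> simp [h]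

-- cutting s into slices at absolute boundary positions (a = previous boundary)
def sliceRun (s : List (Int × Int)) : Nat → List Nat → List (List (Int × Int))
  | _, [] => []
  | a, b :: bs => ((s.drop a).take (b - a)) :: sliceRun s b bs

theorem sliceRun_shift (h : Int × Int) (s : List (Int × Int)) (bs : List Nat) :
    ∀ a, sliceRun (h :: s) (a + 1) (bs.map (· + 1)) = sliceRun s a bs := by
  induction bs with
  | nil => intro a; rfl
  | cons b bs ih =>
      intro a
      simp only [List.map_cons, sliceRun, List.drop_succ_cons, ih]
      congr 2
      omega

-- the sorted list cut at its break positions is exactly the reference grouping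
theorem sliceRun_brkF (d : Int) (t : List (Int × Int)) :
    ∀ h, sliceRun (h :: t) 0 (brkF d 1 (h :: t) ++ [(h :: t).length]) = grp d h t := by
  induction t with
  | nil => intro h; simp [brkF, sliceRun, grp]
  | cons x t' ih =>
      intro h
      have hsh : brkF d 2 (x :: t') = (brkF d 1 (x :: t')).map (· + 1) := brkF_shift d (x :: t') 1
      have hlen : ((h :: x :: t').length : Nat) = (x :: t').length + 1 := rfl
      by_cases hg : |x.1 - h.1| ≤ d
      · -- no break between h and x
        have hb : brkF d 1 (h :: x :: t') = (brkF d 1 (x :: t')).map (· + 1) := by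
          simp [brkF, hsh, not_lt.mpr hg]
        obtain ⟨c, rest, hx⟩ := grp_head d x t'
        have hIH := ih x
        -- the boundary list of x :: t' is nonempty (it ends with the length)
        match hbs : brkF d 1 (x :: t') ++ [(x :: t').length] with
        | [] => simp at hbs
        | b :: bs =>
            have hbig : brkF d 1 (h :: x :: t') ++ [(h :: x :: t').length]
                = (b :: bs).map (· + 1) := by
              rw [hb, hlen, ← hbs]; simp
            rw [hbig]
            have h1 : sliceRun (h :: x :: t') 0 ((b + 1) :: bs.map (· + 1))
                = (h :: (x :: t').take b) :: sliceRun (x :: t') b bs := by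
              simp only [sliceRun, List.drop_zero, Nat.sub_zero, List.take_succ_cons]
              rw [sliceRun_shift h (x :: t') bs b]
            rw [List.map_cons, h1]
            rw [hbs] at hIH
            simp only [sliceRun, List.drop_zero, Nat.sub_zero] at hIH
            rw [hx] at hIH
            injection hIH with e1 e2
            simp only [grp, if_pos hg, hx]
            rw [← e1, ← e2]
      · -- break between h and x (position 1)
        have hb : brkF d 1 (h :: x :: t') = 1 :: (brkF d 1 (x :: t')).map (· + 1) := by
          simp [brkF, hsh, lt_of_not_ge hg]
        have hbig : brkF d 1 (h :: x :: t') ++ [(h :: x :: t').length]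
            = 1 :: ((brkF d 1 (x :: t') ++ [(x :: t').length]).map (· + 1)) := by
          rw [hb, hlen]; simp
        rw [hbig]
        simp only [sliceRun, List.drop_zero, Nat.sub_zero, List.take_succ_cons, List.take_zero]
        rw [show (1 : Nat) = 0 + 1 from rfl, sliceRun_shift h (x :: t') _ 0, ih x]
        simp [grp, hg]

-- B's breaks expression, on a sorted list s, is the Int cast of brkF d 1 s
theorem breaks_eq_brkF (d : Int) (s : List (Int × Int)) :
    ∀ (full : List (Int × Int)) (off : Nat), full.drop off = s →
      (PySem.List.pyRange (off + 1) (full.length : Int) 1).filter (fun i =>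
          decide (d < |(PySem.List.pyGetD full i (0, 0)).1 - (PySem.List.pyGetD full (i - 1) (0, 0)).1|))
        = (brkF d (off + 1) s).map (fun b => (b : Int)) := by
  induction s with
  | nil =>
      intro full off hdrop
      have : full.length ≤ off := by
        have := congrArg List.length hdrop
        simp at this
        omega
      rw [PySem.List.pyRange_one_eq_nil (by exact_mod_cast Nat.le_succ_of_le this)]
      rfl
  | cons p s ih =>
      intro full off hdrop
      match s, hdrop with
      | [], hdrop =>
          have hlen : full.length = off + 1 := by
            have := congrArg List.length hdrop
            simp at this
            omega
          rw [hlen, PySem.List.pyRange_one_eq_nil (by exact_mod_cast le_refl (off + 1))]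
          rfl
      | x :: xs, hdrop =>
          have hoff : off + 1 < full.length := by
            have := congrArg List.length hdrop
            simp at this
            omega
          have hp : full[off]? = some p := by
            have h0 : (full.drop off)[0]? = some p := by rw [hdrop]; rfl
            rw [List.getElem?_drop] at h0
            simpa using h0
          have hx : full[off + 1]? = some x := by
            have h1 : (full.drop off)[1]? = some x := by rw [hdrop]; rfl
            rw [List.getElem?_drop] at h1
            exact h1
          have hcons : PySem.List.pyRange ((off : Int) + 1) (full.length : Int) 1
              = ((off : Int) + 1) :: PySem.List.pyRange ((off : Int) + 1 + 1) (full.length : Int) 1 :=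
            PySem.List.pyRange_one_cons (by exact_mod_cast hoff)
          have hgx : PySem.List.pyGetD full ((off : Int) + 1) (0, 0) = x := by
            have : ((off : Int) + 1) = ((off + 1 : Nat) : Int) := by push_cast; ring
            rw [this, PySem.List.pyGetD_natCast, List.getD, hx]; rfl
          have hgp : PySem.List.pyGetD full ((off : Int) + 1 - 1) (0, 0) = p := by
            have : ((off : Int) + 1 - 1) = ((off : Nat) : Int) := by ring
            rw [this, PySem.List.pyGetD_natCast, List.getD, hp]; rfl
          have hrec := ih full (off + 1) (by
            have : full.drop (off + 1) = (full.drop off).drop 1 := by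
              rw [List.drop_drop]
            rw [this, hdrop]; rfl)
          rw [show ((off : Int) + 1 + 1) = (((off + 1 : Nat) : Int) + 1) by push_cast; ring] at hcons
          rw [hcons, List.filter_cons, hrec]
          simp only [brkF, hgx, hgp]
          by_cases hbr : d < |x.1 - p.1|
          · simp [hbr]
          · simp [hbr]

-- ===== VERDICT (by name: the statement is the Claim_ definition above) =====
theorem custom_clustering_side_spec : Claim_equal_custom_clustering_side := by
  intro data max_diff _ hpre
  unfold Spec_custom_clustering_side
  obtain ⟨h, t, hsd⟩ : ∃ h t, PySem.List.sorted2 data Prod.fst Prod.snd = h :: t := by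
    match hsd : PySem.List.sorted2 data Prod.fst Prod.snd with
    | [] =>
        exfalso
        exact hpre (List.Perm.eq_nil (by rw [← hsd]; exact (PySem.List.sorted2_perm ..).symm))
    | h :: t => exact ⟨h, t, rfl⟩
  simp only [custom_clustering_side, custom_clustering_side_alt, hsd]
  obtain ⟨c, rest, hG⟩ := grp_head max_diff h t
  rw [aLoop_eq max_diff t h [h] [] c rest (by simp) hG]
  -- now compute B's side down to sliceRun/brkF and close with sliceRun_brkF
  have hbr := breaks_eq_brkF max_diff (h :: t) (h :: t) 0 rfl
  simp only [Nat.cast_zero, zero_add] at hbr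
  rw [hbr]
  -- boundary list as a cast of a Nat list
  set bn : List Nat := brkF max_diff 1 (h :: t) ++ [(h :: t).length] with hbn
  have hbounds : (0 : Int) :: ((brkF max_diff 1 (h :: t)).map (fun b => (b : Int)) ++ [((h :: t).length : Int)])
      = (0 :: bn).map (fun b => (b : Int)) := by simp [hbn]
  rw [hbounds]
  have hlen1 : (((0 :: bn).map (fun b => (b : Int))).length : Int) - 1 = (bn.length : Int) := by
    simp
  rw [hlen1]
  -- evaluate the comprehension to sliceRun
  have main : ∀ (s : List (Int × Int)) (a : Nat) (bs : List Nat),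
      (PySem.List.pyRange 0 (bs.length : Int) 1).map (fun j =>
        PySem.List.slice s (some (PySem.List.pyGetD ((a :: bs).map (fun b => (b : Int))) j 0))
          (some (PySem.List.pyGetD ((a :: bs).map (fun b => (b : Int))) (j + 1) 0)))
      = sliceRun s a bs := by
    intro s a bs
    induction bs generalizing a with
    | nil => simp [sliceRun, PySem.List.pyRange_one_eq_nil]
    | cons b bs ih =>
        rw [show ((b :: bs).length : Int) = ((bs.length : Int) + 1) by simp,
          PySem.List.pyRange_one_cons (by positivity)]
        rw [List.map_cons]
        have hz : PySem.List.pyGetD ((a :: b :: bs).map (fun v => (v : Int))) 0 0 = (a : Int) := by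
          simp [PySem.List.pyGetD_zero_cons]
        have ho : PySem.List.pyGetD ((a :: b :: bs).map (fun v => (v : Int))) (0 + 1) 0 = (b : Int) := by
          rw [show ((0 : Int) + 1) = ((1 : Nat) : Int) by norm_num, PySem.List.pyGetD_natCast]
          rfl
        rw [hz, ho, PySem.List.slice_natCast]
        have htail : (PySem.List.pyRange (0 + 1) ((bs.length : Int) + 1) 1).map (fun j =>
            PySem.List.slice s (some (PySem.List.pyGetD ((a :: b :: bs).map (fun v => (v : Int))) j 0))
              (some (PySem.List.pyGetD ((a :: b :: bs).map (fun v => (v : Int))) (j + 1) 0)))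
            = (PySem.List.pyRange 0 (bs.length : Int) 1).map (fun j =>
            PySem.List.slice s (some (PySem.List.pyGetD ((b :: bs).map (fun v => (v : Int))) j 0))
              (some (PySem.List.pyGetD ((b :: bs).map (fun v => (v : Int))) (j + 1) 0))) := by
          rw [PySem.List.pyRange_one, PySem.List.pyRange_one]
          rw [show ((bs.length : Int) + 1 - (0 + 1)) = ((bs.length : Int) - 0) by ring]
          rw [List.map_map, List.map_map]
          apply List.map_congr_left
          intro m hm
          simp only [Function.comp]
          congr 2
          · rw [show ((0 : Int) + 1 + m) = (((m + 1 : Nat) : Int)) by push_cast; ring,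
              show ((0 : Int) + m) = ((m : Nat) : Int) by ring,
              PySem.List.pyGetD_natCast, PySem.List.pyGetD_natCast]
            rfl
          · rw [show ((0 : Int) + 1 + m + 1) = (((m + 2 : Nat) : Int)) by push_cast; ring,
              show ((0 : Int) + m + 1) = (((m + 1 : Nat) : Int)) by push_cast; ring,
              PySem.List.pyGetD_natCast, PySem.List.pyGetD_natCast]
            rfl
        rw [htail, ih b]
        rfl
  rw [main (h :: t) 0 bn, hbn, sliceRun_brkF max_diff t h, hG]
  simp
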